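-- pv_equiv track=rewrite | github.com/svilerino/metnum | tp2/src/fixtures_ideales.py | ordenar_por_puntaje
-- ===== SOURCE A (Python) =====
-- def ordenar_por_puntaje(puntaje_por_cant_fechas):
--     res = {}
--     for cant_fechas, puntajes in puntaje_por_cant_fechas.items():
--         restantes = puntajes[:]
--         ordenados = []
--         while len(restantes) > 0:
--             mejor_puntaje = max(restantes)
--             mejores_posiciones = [posicion for posicion, puntaje in enumerate(puntajes) if puntaje == mejor_puntaje]
--             competidores_empatados = [mejor_posicion+1 for mejor_posicion in mejores_posiciones]
--             competidores_empatados.reverse()    # meto ruido para que el empate no termine bien ordenado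
--             ordenados += competidores_empatados
--             restantes = [restante for restante in restantes if restante != mejor_puntaje]
--         res[cant_fechas] = ordenados
--     return res
-- ===== SOURCE B (Python) =====
-- def ordenar_por_puntaje(puntaje_por_cant_fechas):
--     res = {}
--     for cant_fechas, puntajes in puntaje_por_cant_fechas.items():
--         grupos = {}
--         for pos, p in enumerate(puntajes, 1):
--             grupos.setdefault(p, []).append(pos)
--         ordenados = []
--         for p in sorted(grupos, reverse=True):
--             ordenados.extend(reversed(grupos[p]))
--         res[cant_fechas] = ordenados
--     return res
-- ===== Notes on version B (the rewrite author's own statement) =====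
-- stated objective: faster
-- what changed: Replaces A's repeated max-scan-filter-rescan loop per key with a single grouping pass building a score->positions dict, then one sort of the distinct scores descending and a grouped emit of each group's positions reversed.
import Mathlib
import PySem

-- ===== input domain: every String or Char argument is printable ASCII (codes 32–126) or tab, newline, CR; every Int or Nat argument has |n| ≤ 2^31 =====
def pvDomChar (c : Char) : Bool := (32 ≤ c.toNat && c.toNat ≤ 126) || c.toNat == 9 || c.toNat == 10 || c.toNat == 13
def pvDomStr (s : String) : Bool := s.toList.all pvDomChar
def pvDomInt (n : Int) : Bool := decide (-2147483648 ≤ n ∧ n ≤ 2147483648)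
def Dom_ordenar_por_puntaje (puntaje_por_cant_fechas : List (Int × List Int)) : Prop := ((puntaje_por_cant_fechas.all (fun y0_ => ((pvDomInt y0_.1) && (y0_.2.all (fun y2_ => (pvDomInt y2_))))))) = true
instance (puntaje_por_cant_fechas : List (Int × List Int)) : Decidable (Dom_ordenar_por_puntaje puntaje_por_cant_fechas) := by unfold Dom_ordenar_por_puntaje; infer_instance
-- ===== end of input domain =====

-- B replaces A's repeated max-scan-and-filter per key with one grouping pass plus one
-- descending sort of the distinct scores (objective: faster, asymptotically).

-- ===== PORT A =====
-- termination helper for A's while-loop: filtering out the max strictly shrinks `restantes`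
theorem pvA_filter_lt (restantes : List Int) (h : restantes.length > 0) :
    (restantes.filter (fun x => x != (PySem.List.max? restantes (fun x => x)).getD 0)).length
      < restantes.length := by
  have hne : restantes ≠ [] := by
    intro hnil; simp [hnil] at h
  obtain ⟨m, hm⟩ : ∃ m, PySem.List.max? restantes (fun x => x) = some m := by
    cases hmx : PySem.List.max? restantes (fun x => x) with
    | none => exact absurd ((PySem.List.max?_eq_none_iff _ _).mp hmx) hne
    | some m => exact ⟨m, rfl⟩
  have hmem : m ∈ restantes := PySem.List.max?_mem hm
  rw [hm]
  refine List.length_filter_lt_length_iff_exists.mpr ⟨m, hmem, ?_⟩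
  simp

-- the while-loop of A, per key
def pvAGo (puntajes : List Int) (restantes : List Int) (ordenados : List Int) : List Int :=
  if h : restantes.length > 0 then
    let mejor_puntaje := (PySem.List.max? restantes (fun x => x)).getD 0
    let mejores_posiciones :=
      ((PySem.List.enumerate puntajes 0).filter (fun t => t.2 == mejor_puntaje)).map (·.1)
    let competidores_empatados := (mejores_posiciones.map (· + 1)).reverse
    pvAGo puntajes (restantes.filter (fun x => x != mejor_puntaje))
      (ordenados ++ competidores_empatados)
  else ordenados
termination_by restantes.length
decreasing_by simpa [List.filter_attach, List.length_unattach] using pvA_filter_lt restantes h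

def ordenar_por_puntaje (puntaje_por_cant_fechas : List (Int × List Int)) : List (Int × List Int) :=
  (puntaje_por_cant_fechas.foldl
    (fun res kv => res.insert kv.1 (pvAGo kv.2 kv.2 []))
    PySem.Dict.empty).items

-- ===== PORT B =====
-- per key: group positions by score, then emit groups by descending score, each reversed
def pvBKey (puntajes : List Int) : List Int :=
  let grupos : PySem.Dict Int (List Int) :=
    (PySem.List.enumerate puntajes 1).foldl
      (fun d t => d.modify t.2 [] (fun l => l ++ [t.1])) PySem.Dict.empty
  (PySem.List.sorted grupos.keys (fun x => x) true).foldl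
    (fun ordenados p => ordenados ++ (grupos.getD p []).reverse) []

def ordenar_por_puntaje_alt (puntaje_por_cant_fechas : List (Int × List Int)) : List (Int × List Int) :=
  (puntaje_por_cant_fechas.foldl
    (fun res kv => res.insert kv.1 (pvBKey kv.2))
    PySem.Dict.empty).items

-- ===== PRECONDITION & SPEC =====
def Spec_ordenar_por_puntaje (puntaje_por_cant_fechas : List (Int × List Int)) (out : List (Int × List Int)) : Prop := out = ordenar_por_puntaje_alt puntaje_por_cant_fechas
instance (puntaje_por_cant_fechas : List (Int × List Int)) (out : List (Int × List Int)) : Decidable (Spec_ordenar_por_puntaje puntaje_por_cant_fechas out) := by unfold Spec_ordenar_por_puntaje; infer_instance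

-- ===== CLAIM (what is proved, stated in full; the proofs are below) =====
def Claim_equal_ordenar_por_puntaje : Prop := ∀ (puntaje_por_cant_fechas : List (Int × List Int)), Dom_ordenar_por_puntaje puntaje_por_cant_fechas → Spec_ordenar_por_puntaje puntaje_por_cant_fechas (ordenar_por_puntaje puntaje_por_cant_fechas)

-- ===== LEMMAS AND PROOFS =====

-- the common description of one key's output: distinct scores descending, each score's
-- 1-based positions in descending order
def pvGroup (puntajes : List Int) (m : Int) : List Int :=
  ((((PySem.List.enumerate puntajes 0).filter (fun t => t.2 == m)).map (·.1)).map (· + 1)).reverse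

def pvSpecKey (puntajes : List Int) (vals : List Int) : List Int :=
  (PySem.List.sorted (PySem.Set.ofList vals) (fun x => x) true).flatMap (pvGroup puntajes)

theorem pvSorted_rev_pairwise_gt (vals : List Int) :
    (PySem.List.sorted (PySem.Set.ofList vals) (fun x => x) true).Pairwise (· > ·) := by
  have hge := PySem.List.sorted_pairwise_rev (PySem.Set.ofList vals) (fun x => x)
  have hnd : (PySem.List.sorted (PySem.Set.ofList vals) (fun x => x) true).Nodup :=
    (PySem.List.sorted_perm _ _ _).nodup_iff.mpr (PySem.Set.nodup_ofList vals)
  have := hnd.and hge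
  exact this.imp (fun h => lt_of_le_of_ne h.2 (Ne.symm h.1))

-- peel off the maximum: sorted-descending of the distinct values of a nonempty r
theorem pvSortedDesc_cons (r : List Int) (m : Int)
    (hm : PySem.List.max? r (fun x => x) = some m) :
    PySem.List.sorted (PySem.Set.ofList r) (fun x => x) true
      = m :: PySem.List.sorted (PySem.Set.ofList (r.filter (fun x => x != m))) (fun x => x) true := by
  have hmem : m ∈ r := PySem.List.max?_mem hm
  have hmax : ∀ y ∈ r, y ≤ m := by
    intro y hy; simpa using PySem.List.max?_isMax hm y hy
  set t := PySem.List.sorted (PySem.Set.ofList (r.filter (fun x => x != m))) (fun x => x) true with ht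
  have hmemt : ∀ x, x ∈ t ↔ (x ∈ r ∧ x ≠ m) := by
    intro x
    rw [ht, PySem.List.mem_sorted, PySem.Set.mem_ofList, List.mem_filter]
    simp
  have hperm : (m :: t).Perm (PySem.Set.ofList r) := by
    have hndt : t.Nodup :=
      (PySem.List.sorted_perm _ _ _).nodup_iff.mpr (PySem.Set.nodup_ofList _)
    have hnd : (m :: t).Nodup := by
      refine List.nodup_cons.mpr ⟨?_, hndt⟩
      intro hmt; exact ((hmemt m).mp hmt).2 rfl
    refine (List.perm_ext_iff_of_nodup hnd (PySem.Set.nodup_ofList r)).mpr ?_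
    intro x
    rw [PySem.Set.mem_ofList, List.mem_cons, hmemt x]
    constructor
    · rintro (rfl | ⟨hx, _⟩) <;> [exact hmem; exact hx]
    · intro hx
      by_cases hxm : x = m
      · exact Or.inl hxm
      · exact Or.inr ⟨hx, hxm⟩
  have hpw : (m :: t).Pairwise (· > ·) := by
    refine List.pairwise_cons.mpr ⟨?_, pvSorted_rev_pairwise_gt _⟩
    intro x hx
    obtain ⟨hxr, hxm⟩ := (hmemt x).mp hx
    exact lt_of_le_of_ne (hmax x hxr) hxm
  exact PySem.List.sorted_rev_eq_of_perm_of_pairwise_gt _ _ _ hperm hpw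

-- A's loop computes the spec
theorem pvAGo_spec (puntajes : List Int) : ∀ (n : Nat) (r : List Int), r.length ≤ n →
    ∀ acc, pvAGo puntajes r acc = acc ++ pvSpecKey puntajes r := by
  intro n
  induction n with
  | zero =>
    intro r hle acc
    have hr : r = [] := List.length_eq_zero_iff.mp (Nat.le_zero.mp hle)
    subst hr
    rw [pvAGo]
    simp [pvSpecKey, pysem]
  | succ n ih =>
    intro r hle acc
    rw [pvAGo]
    by_cases h : r.length > 0
    · simp only [h, dif_pos]
      obtain ⟨m, hm⟩ : ∃ m, PySem.List.max? r (fun x => x) = some m := by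
        cases hmx : PySem.List.max? r (fun x => x) with
        | none =>
          exact absurd ((PySem.List.max?_eq_none_iff _ _).mp hmx)
            (by intro hnil; simp [hnil] at h)
        | some m => exact ⟨m, rfl⟩
      rw [hm]
      simp only [Option.getD_some]
      have hlen : (r.filter (fun x => x != m)).length ≤ n := by
        have := pvA_filter_lt r h
        rw [hm] at this
        simp only [Option.getD_some] at this
        omega
      rw [ih (r.filter (fun x => x != m)) hlen]
      rw [pvSpecKey, pvSpecKey, pvSortedDesc_cons r m hm, List.flatMap_cons]
      simp [pvGroup, List.append_assoc]
    · have hr : r = [] := by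
        cases r with
        | nil => rfl
        | cons a t => simp at h
      subst hr
      simp [pvSpecKey, pysem]

-- position lists: shifting the enumeration start by one
theorem pvEnum_shift (v : Int) : ∀ (p : List Int) (s : Int),
    ((PySem.List.enumerate p (s + 1)).filter (fun t => t.2 == v)).map (·.1)
      = (((PySem.List.enumerate p s).filter (fun t => t.2 == v)).map (·.1)).map (· + 1) := by
  intro p
  induction p with
  | nil => intro s; simp [PySem.List.enumerate_nil]
  | cons a t ih =>
    intro s
    rw [PySem.List.enumerate_cons, PySem.List.enumerate_cons]
    by_cases ha : a = v
    · subst ha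
      simp only [List.filter_cons, beq_self_eq_true, if_pos, List.map_cons]
      refine List.cons_eq_cons.mpr ⟨rfl, ?_⟩
      exact ih (s + 1)
    · simp only [List.filter_cons]
      have : ((s + 1, a).2 == v) = false := by simpa using ha
      have h0 : ((s, a).2 == v) = false := by simpa using ha
      simp only [this, Bool.false_eq_true, if_false]
      exact ih (s + 1)

-- B's per-key computation equals the spec
theorem pvBKey_spec (puntajes : List Int) :
    pvBKey puntajes = pvSpecKey puntajes puntajes := by
  rw [pvBKey, pvSpecKey]
  have hfold :
      (PySem.List.enumerate puntajes 1).foldl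
        (fun d t => d.modify t.2 [] (fun l => l ++ [t.1])) PySem.Dict.empty
      = ((PySem.List.enumerate puntajes 1).map Prod.swap).foldl
        (fun d q => d.modify q.1 [] (fun l => l ++ [q.2])) PySem.Dict.empty := by
    rw [List.foldl_map]
    rfl
  set grupos := (PySem.List.enumerate puntajes 1).foldl
      (fun d t => d.modify t.2 [] (fun l => l ++ [t.1])) PySem.Dict.empty with hg
  have hkeys : grupos.keys = PySem.Set.ofList puntajes := by
    rw [hg]
    rw [show (fun (d : PySem.Dict Int (List Int)) (t : Int × Int) => d.modify t.2 [] (fun l => l ++ [t.1]))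
        = (fun d t => d.modify ((·.2 : Int × Int → Int) t) [] ((fun (t : Int × Int) (l : List Int) => l ++ [t.1]) t)) from rfl]
    rw [PySem.Dict.keys_foldl_modify_key]
    simp [pysem]
  have hgetD : ∀ v, grupos.getD v []
      = (((PySem.List.enumerate puntajes 0).filter (fun t => t.2 == v)).map (·.1)).map (· + 1) := by
    intro v
    rw [hfold, PySem.Dict.getD_foldl_modify_append]
    rw [PySem.Dict.getD_empty, List.nil_append]
    rw [List.filter_map, List.map_map]
    have h1 : (fun (q : Int × Int) => q.1 == v) ∘ Prod.swap = (fun (t : Int × Int) => t.2 == v) := rfl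
    have h2 : (fun (q : Int × Int) => q.2) ∘ Prod.swap = (fun (t : Int × Int) => t.1) := rfl
    rw [h1, h2]
    have := pvEnum_shift v puntajes 0
    simpa using this
  rw [hkeys]
  rw [PySem.List.foldl_append_eq_flatMap (g := fun p => (grupos.getD p []).reverse)]
  rw [List.nil_append]
  refine List.flatMap_congr ?_
  intro k _
  rw [hgetD k, pvGroup]

-- per key, the two ports agree
theorem pvKey_eq (puntajes : List Int) : pvAGo puntajes puntajes [] = pvBKey puntajes := by
  rw [pvBKey_spec, pvAGo_spec puntajes puntajes.length puntajes le_rfl, List.nil_append]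

-- ===== VERDICT (by name: the statement is the Claim_ definition above) =====
theorem ordenar_por_puntaje_spec : Claim_equal_ordenar_por_puntaje := by
  intro l _
  unfold Spec_ordenar_por_puntaje ordenar_por_puntaje ordenar_por_puntaje_alt
  congr 2
  funext res kv
  rw [pvKey_eq]
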